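-- pv_equiv track=rewrite | github.com/kirambenaleya/BachelorThesis | AlgorithmTeamFormation/helping_functions/group_sizes.py | determine_group_sizes
-- ===== SOURCE A (Python) =====
-- from math import ceil
--
-- def determine_group_sizes(students, max_number_students_per_group):
--     # Make sure the values are chosen correctly and make sense
--     assert isinstance(students, int)
--     assert isinstance(max_number_students_per_group, int)
--     assert students > 0
--     assert max_number_students_per_group > 0
--
--     # Calculate the number of groups
--     groups = ceil(students / max_number_students_per_group)
--     sizes = []
--
--     # While the number of students is larger than 0 keep calculating the amount of group members per group
--     while students > 0:
--         number = ceil(students / groups)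
--         sizes.append(number)
--         students = students - number
--         groups = groups - 1
--
--     # Return the list of group sizes
--     return sizes
-- ===== SOURCE B (Python) =====
-- from math import ceil
--
-- def determine_group_sizes(students, max_number_students_per_group):
--     # Make sure the values are chosen correctly and make sense
--     assert isinstance(students, int)
--     assert isinstance(max_number_students_per_group, int)
--     assert students > 0
--     assert max_number_students_per_group > 0
--
--     # Calculate the number of groups
--     groups = ceil(students / max_number_students_per_group)
--
--     # Closed form: r groups of size q+1 followed by groups-r groups of size q
--     q = students // groups
--     r = students % groups
--     return [q + 1] * r + [q] * (groups - r)
-- ===== Notes on version B (the rewrite author's own statement) =====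
-- stated objective: simpler
-- what changed: Replaced the greedy while-loop (repeated ceil of remaining/groups) by the closed-form divmod construction [q+1]*r + [q]*(groups-r).
import Mathlib
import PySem

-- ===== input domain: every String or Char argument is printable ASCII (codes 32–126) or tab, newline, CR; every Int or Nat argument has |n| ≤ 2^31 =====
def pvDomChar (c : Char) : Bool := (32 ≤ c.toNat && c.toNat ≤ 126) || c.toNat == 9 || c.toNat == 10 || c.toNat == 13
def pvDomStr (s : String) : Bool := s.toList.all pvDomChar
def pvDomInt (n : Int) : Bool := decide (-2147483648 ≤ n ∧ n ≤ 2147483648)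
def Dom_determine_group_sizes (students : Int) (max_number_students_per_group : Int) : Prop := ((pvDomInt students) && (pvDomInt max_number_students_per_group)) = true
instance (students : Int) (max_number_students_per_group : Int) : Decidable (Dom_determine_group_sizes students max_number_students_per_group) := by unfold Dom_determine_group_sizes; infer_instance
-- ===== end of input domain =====

-- B replaces A's greedy while-loop by the closed-form divmod construction; objective: simpler.
-- Python's ceil(a / b) (float) equals integer ceiling division -((-a) // b) on the whole
-- domain |n| ≤ 2^31 (the float rounding of a/b never crosses an integer there); both ports
-- use that exact integer form.

-- ===== PORT A =====
-- ceil(a / b) for the positive divisors reached inside Pre_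
def pvCeilDiv (a b : Int) : Int := -(PySem.Int.floordiv (-a) b)

-- the while-loop of A, fuel = students.toNat (inside Pre_ each iteration decreases students by ≥ 1)
def pvLoopA : Nat → Int → Int → List Int
  | 0, _, _ => []
  | fuel + 1, students, groups =>
    if students > 0 then
      let number := pvCeilDiv students groups
      number :: pvLoopA fuel (students - number) (groups - 1)
    else []

def determine_group_sizes (students : Int) (max_number_students_per_group : Int) : List Int :=
  let groups := pvCeilDiv students max_number_students_per_group
  pvLoopA students.toNat students groups

-- ===== PORT B =====
def determine_group_sizes_alt (students : Int) (max_number_students_per_group : Int) : List Int :=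
  let groups := pvCeilDiv students max_number_students_per_group
  let q := PySem.Int.floordiv students groups
  let r := PySem.Int.mod students groups
  List.replicate r.toNat (q + 1) ++ List.replicate (groups - r).toNat q

-- ===== PRECONDITION & SPEC =====
-- Pre_: exactly A's asserts; on other ints A raises AssertionError.
def Pre_determine_group_sizes (students : Int) (max_number_students_per_group : Int) : Prop :=
  students > 0 ∧ max_number_students_per_group > 0
instance (students : Int) (max_number_students_per_group : Int) : Decidable (Pre_determine_group_sizes students max_number_students_per_group) := by unfold Pre_determine_group_sizes; infer_instance
def pvWitness_determine_group_sizes : Int × Int := (10, 3)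

def Spec_determine_group_sizes (students : Int) (max_number_students_per_group : Int) (out : List Int) : Prop := out = determine_group_sizes_alt students max_number_students_per_group
instance (students : Int) (max_number_students_per_group : Int) (out : List Int) : Decidable (Spec_determine_group_sizes students max_number_students_per_group out) := by unfold Spec_determine_group_sizes; infer_instance

-- ===== CLAIM (what is proved, stated in full; the proofs are below) =====
def Claim_equal_determine_group_sizes : Prop := ∀ (students : Int) (max_number_students_per_group : Int), Dom_determine_group_sizes students max_number_students_per_group → Pre_determine_group_sizes students max_number_students_per_group → Spec_determine_group_sizes students max_number_students_per_group (determine_group_sizes students max_number_students_per_group)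

-- ===== LEMMAS AND PROOFS =====

lemma pvCeilDiv_eq (a b q : Int) (hb : 0 < b) :
    pvCeilDiv a b = q ↔ (q - 1) * b < a ∧ a ≤ q * b := by
  unfold pvCeilDiv
  exact PySem.Int.neg_floordiv_neg_eq_iff_of_pos hb

-- the greedy loop equals the closed form whenever 0 < g ≤ s and there is enough fuel
lemma pvLoopA_closed (fuel : Nat) : ∀ (s g : Int), 0 < g → g ≤ s → g.toNat ≤ fuel →
    pvLoopA fuel s g =
      List.replicate (PySem.Int.mod s g).toNat (PySem.Int.floordiv s g + 1) ++
      List.replicate (g - PySem.Int.mod s g).toNat (PySem.Int.floordiv s g) := by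
  induction fuel with
  | zero => intro s g hg _ hfuel; exfalso; omega
  | succ fuel ih =>
    intro s g hg hgs hfuel
    have hdm := PySem.Int.floordiv_mul_add_mod s g
    have hr0 := PySem.Int.mod_nonneg s hg
    have hrg := PySem.Int.mod_lt s hg
    generalize hq : PySem.Int.floordiv s g = q at hdm ⊢
    generalize hr : PySem.Int.mod s g = r at hdm hr0 hrg ⊢
    have hs : s > 0 := by omega
    have hq1 : 1 ≤ q := by nlinarith
    rw [pvLoopA, if_pos hs]
    by_cases hrz : r = 0
    · -- number = q
      have hnum : pvCeilDiv s g = q := by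
        rw [pvCeilDiv_eq s g q hg]; constructor <;> nlinarith
      rw [hnum]
      show q :: pvLoopA fuel (s - q) (g - 1) =
        List.replicate r.toNat (q + 1) ++ List.replicate (g - r).toNat q
      by_cases hg1 : g = 1
      · -- last iteration: s - q = 0
        have hs' : s - q = 0 := by nlinarith
        have hnil : pvLoopA fuel (s - q) (g - 1) = [] := by
          cases fuel with
          | zero => rfl
          | succ n => rw [pvLoopA, if_neg (by omega)]
        rw [hnil]
        have h1 : r.toNat = 0 := by omega
        have h2 : (g - r).toNat = 1 := by omega
        rw [h1, h2]
        simp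
      · -- g ≥ 2: recurse with s' = q*(g-1), g' = g-1, divmod (q, 0)
        have hg' : 0 < g - 1 := by omega
        have hs'' : s - q = q * (g - 1) := by nlinarith
        have hq' : PySem.Int.floordiv (s - q) (g - 1) = q := by
          rw [PySem.Int.floordiv_eq_iff_of_pos hg']; constructor <;> nlinarith
        have hr' : PySem.Int.mod (s - q) (g - 1) = 0 := by
          have h := PySem.Int.floordiv_mul_add_mod (s - q) (g - 1)
          rw [hq'] at h; nlinarith
        rw [ih (s - q) (g - 1) hg' (by nlinarith) (by omega), hq', hr']
        have h1 : r.toNat = 0 := by omega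
        have h2 : (0 : Int).toNat = 0 := rfl
        have h3 : ((g - 1) - 0).toNat + 1 = (g - r).toNat := by omega
        rw [h1, h2, ← h3]
        simp [List.replicate_succ]
    · -- r > 0: number = q + 1
      have hrpos : 0 < r := lt_of_le_of_ne hr0 (Ne.symm hrz)
      have hnum : pvCeilDiv s g = q + 1 := by
        rw [pvCeilDiv_eq s g (q + 1) hg]; constructor <;> nlinarith
      rw [hnum]
      show (q + 1) :: pvLoopA fuel (s - (q + 1)) (g - 1) =
        List.replicate r.toNat (q + 1) ++ List.replicate (g - r).toNat q
      have hg2 : 2 ≤ g := by omega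
      have hg' : 0 < g - 1 := by omega
      have hs'' : s - (q + 1) = q * (g - 1) + (r - 1) := by nlinarith
      have hq' : PySem.Int.floordiv (s - (q + 1)) (g - 1) = q := by
        rw [PySem.Int.floordiv_eq_iff_of_pos hg']; constructor <;> nlinarith
      have hr' : PySem.Int.mod (s - (q + 1)) (g - 1) = r - 1 := by
        have h := PySem.Int.floordiv_mul_add_mod (s - (q + 1)) (g - 1)
        rw [hq'] at h; nlinarith
      rw [ih (s - (q + 1)) (g - 1) hg' (by nlinarith) (by omega), hq', hr']
      have h1 : r.toNat = (r - 1).toNat + 1 := by omega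
      have h2 : ((g - 1) - (r - 1)).toNat = (g - r).toNat := by omega
      rw [h1, h2]
      simp [List.replicate_succ]

-- inside Pre_, 0 < groups ≤ students
lemma pv_groups_bounds (s m : Int) (hs : 0 < s) (hm : 0 < m) :
    0 < pvCeilDiv s m ∧ pvCeilDiv s m ≤ s := by
  set g := pvCeilDiv s m with hg
  have h : (g - 1) * m < s ∧ s ≤ g * m := by
    rw [← pvCeilDiv_eq s m g hm]
  constructor
  · nlinarith
  · nlinarith

-- ===== VERDICT (by name: the statement is the Claim_ definition above) =====
theorem determine_group_sizes_spec : Claim_equal_determine_group_sizes := by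
  intro s m _ hpre
  obtain ⟨hs, hm⟩ := hpre
  unfold Spec_determine_group_sizes determine_group_sizes determine_group_sizes_alt
  obtain ⟨hg, hgs⟩ := pv_groups_bounds s m hs hm
  exact pvLoopA_closed s.toNat s (pvCeilDiv s m) hg hgs (by omega)
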